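-- pv_equiv track=rewrite | github.com/testing-region/tests | python/try.py | gamerColors
-- ===== SOURCE A (Python) =====
-- def gamerColors(val):
--     w = 0
--     b = 0
--     for i in range(len(val)-2):
--         if val[i] == val[i+1] and val[i+1] == val[i+2]:
--             if val[i] == 'w':
--                 w += 1
--             elif val[i] == 'b':
--                 b += 1
--
--     # return w, b
--     if w > b:
--         return 'wendy'
--     else:
--         return 'bob'
-- ===== SOURCE B (Python) =====
-- def gamerColors(val):
--     w = 0
--     b = 0
--     i = 0
--     n = len(val)
--     while i < n:
--         j = i + 1
--         while j < n and val[j] == val[i]: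
--             j += 1
--         L = j - i
--         if val[i] == 'w':
--             w += max(0, L - 2)
--         elif val[i] == 'b':
--             b += max(0, L - 2)
--         i = j
--     if w > b:
--         return 'wendy'
--     else:
--         return 'bob'
-- ===== Notes on version B (the rewrite author's own statement) =====
-- stated objective: faster
-- what changed: Replaces A's sliding 3-index window loop with a run-length scan: each maximal run of identical characters of length L contributes max(0, L-2) triples to its counter.
import Mathlib
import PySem

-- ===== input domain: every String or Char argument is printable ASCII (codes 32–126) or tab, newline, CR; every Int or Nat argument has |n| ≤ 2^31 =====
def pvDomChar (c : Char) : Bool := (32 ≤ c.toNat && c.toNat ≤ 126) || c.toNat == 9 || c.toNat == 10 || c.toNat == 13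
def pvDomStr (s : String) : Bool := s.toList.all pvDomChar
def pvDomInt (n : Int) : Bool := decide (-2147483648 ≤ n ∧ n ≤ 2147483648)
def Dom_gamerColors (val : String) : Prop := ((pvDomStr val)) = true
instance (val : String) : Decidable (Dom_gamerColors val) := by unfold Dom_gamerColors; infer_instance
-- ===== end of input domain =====

-- B replaces A's sliding 3-window index loop by a run-length scan (each maximal run of
-- length L contributes max(0, L-2) triples); objective: constant-factor speedup, measured.

-- ===== PORT A =====
def gamerColors (val : String) : String :=
  let cs := val.toList
  let n : Int := PySem.Str.len val
  let st := (PySem.List.pyRange 0 (n - 2) 1).foldl (fun (st : Int × Int) i =>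
    if PySem.List.pyGetD cs i ' ' = PySem.List.pyGetD cs (i + 1) ' ' ∧
       PySem.List.pyGetD cs (i + 1) ' ' = PySem.List.pyGetD cs (i + 2) ' ' then
      if PySem.List.pyGetD cs i ' ' = 'w' then (st.1 + 1, st.2)
      else if PySem.List.pyGetD cs i ' ' = 'b' then (st.1, st.2 + 1)
      else st
    else st) (0, 0)
  if st.1 > st.2 then "wendy" else "bob"

-- ===== PORT B =====
-- inner `while j < n and val[j] == val[i]` of Source B: length of the run of c at the front, and the rest
def spanRun (c : Char) : List Char → Nat × List Char
  | [] => (0, [])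
  | x :: xs => if x = c then ((spanRun c xs).1 + 1, (spanRun c xs).2) else (0, x :: xs)

theorem spanRun_snd_length_le (c : Char) (xs : List Char) : (spanRun c xs).2.length ≤ xs.length := by
  induction xs with
  | nil => simp [spanRun]
  | cons x xs ih => by_cases h : x = c <;> simp [spanRun, h] <;> omega

-- outer while loop of Source B: advance run by run, accumulating (w, b)
def altLoop : List Char → Int × Int
  | [] => (0, 0)
  | c :: rest =>
    let s := spanRun c rest
    let L : Int := (s.1 : Int) + 1
    let p := altLoop s.2
    if c = 'w' then (p.1 + max 0 (L - 2), p.2)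
    else if c = 'b' then (p.1, p.2 + max 0 (L - 2))
    else p
termination_by cs => cs.length
decreasing_by
  have := spanRun_snd_length_le c rest
  simp; omega

def gamerColors_alt (val : String) : String :=
  let p := altLoop val.toList
  if p.1 > p.2 then "wendy" else "bob"

-- ===== PRECONDITION & SPEC =====
def Spec_gamerColors (val : String) (out : String) : Prop := out = gamerColors_alt val
instance (val : String) (out : String) : Decidable (Spec_gamerColors val out) := by unfold Spec_gamerColors; infer_instance

-- ===== CLAIM (what is proved, stated in full; the proofs are below) =====
def Claim_equal_gamerColors : Prop := ∀ (val : String), Dom_gamerColors val → Spec_gamerColors val (gamerColors val)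

-- ===== LEMMAS AND PROOFS =====

-- number of triples of equal characters all equal to c (the common spec both ports are reduced to)
def triCnt (c : Char) : List Char → Int
  | a :: x :: y :: rest => (if a = x ∧ x = y ∧ a = c then 1 else 0) + triCnt c (x :: y :: rest)
  | _ => 0

lemma triCnt_cons_ne (ch c : Char) (r : List Char) (hr : r.head? ≠ some c) :
    triCnt ch (c :: r) = triCnt ch r := by
  match r with
  | [] => simp [triCnt]
  | [r0] => simp [triCnt]
  | r0 :: r1 :: rr =>
    have : ¬ c = r0 := by intro h; exact hr (by simp [h])
    simp [triCnt, this]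

lemma runs_triCnt (ch c : Char) (k : Nat) (r : List Char) (hr : r.head? ≠ some c) :
    triCnt ch (c :: (List.replicate k c ++ r)) =
      (if c = ch then max 0 ((k : Int) + 1 - 2) else 0) + triCnt ch r := by
  induction k with
  | zero =>
    simp only [List.replicate, List.nil_append]
    rw [triCnt_cons_ne ch c r hr]
    have : max (0:Int) ((0:Nat) + 1 - 2) = 0 := by simp
    split_ifs <;> simp_all
  | succ n ih =>
    match n, ih with
    | 0, _ =>
      match r, hr with
      | [], _ => simp [triCnt]
      | r0 :: rr, hr =>
        have hcr : ¬ c = r0 := by intro h; exact hr (by simp [h])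
        have h1 : triCnt ch (c :: r0 :: rr) = triCnt ch (r0 :: rr) :=
          triCnt_cons_ne ch c (r0 :: rr) (by simpa using Ne.symm hcr)
        simp only [List.replicate, List.cons_append, List.nil_append, triCnt, h1]
        split_ifs <;> simp_all
    | m + 1, ih =>
      have step : triCnt ch (c :: (List.replicate (m + 2) c ++ r)) =
          (if c = ch then 1 else 0) + triCnt ch (c :: (List.replicate (m + 1) c ++ r)) := by
        simp only [List.replicate, List.cons_append, triCnt]
        split_ifs <;> simp_all
      rw [step, ih]
      split_ifs with h <;> push_cast <;> omega

lemma spanRun_append (c : Char) (xs : List Char) :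
    List.replicate (spanRun c xs).1 c ++ (spanRun c xs).2 = xs := by
  induction xs with
  | nil => simp [spanRun]
  | cons x xs ih =>
    by_cases h : x = c
    · subst h; simp [spanRun, List.replicate, ih]
    · simp [spanRun, h]

lemma spanRun_head (c : Char) (xs : List Char) : (spanRun c xs).2.head? ≠ some c := by
  induction xs with
  | nil => simp [spanRun]
  | cons x xs ih =>
    by_cases h : x = c
    · simpa [spanRun, h] using ih
    · simp [spanRun, h]

lemma altLoop_eq (cs : List Char) : altLoop cs = (triCnt 'w' cs, triCnt 'b' cs) := by
  have main : ∀ (n : Nat) (cs : List Char), cs.length ≤ n →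
      altLoop cs = (triCnt 'w' cs, triCnt 'b' cs) := by
    intro n
    induction n with
    | zero =>
      intro cs h
      match cs, h with
      | [], _ => simp [altLoop, triCnt]
    | succ n ih =>
      intro cs h
      match cs with
      | [] => simp [altLoop, triCnt]
      | c :: rest =>
        have hlen : (spanRun c rest).2.length ≤ n := by
          have := spanRun_snd_length_le c rest
          simp at h; omega
        have hrec := ih (spanRun c rest).2 hlen
        have hw := runs_triCnt 'w' c (spanRun c rest).1 (spanRun c rest).2 (spanRun_head c rest)
        have hb := runs_triCnt 'b' c (spanRun c rest).1 (spanRun c rest).2 (spanRun_head c rest)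
        rw [spanRun_append c rest] at hw hb
        rw [altLoop, hrec, hw, hb]
        by_cases h1 : c = 'w'
        · simp [h1]; try ring
        · by_cases h2 : c = 'b'
          · simp [h1, h2]; try ring
          · simp [h1, h2]
  exact main cs.length cs le_rfl

lemma foldA (cs : List Char) (w0 b0 : Int) :
    (List.range (cs.length - 2)).foldl (fun (st : Int × Int) i =>
      if cs.getD i ' ' = cs.getD (i + 1) ' ' ∧ cs.getD (i + 1) ' ' = cs.getD (i + 2) ' ' then
        if cs.getD i ' ' = 'w' then (st.1 + 1, st.2)
        else if cs.getD i ' ' = 'b' then (st.1, st.2 + 1)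
        else st
      else st) (w0, b0) = (w0 + triCnt 'w' cs, b0 + triCnt 'b' cs) := by
  induction cs generalizing w0 b0 with
  | nil => simp [triCnt]
  | cons a l ih =>
    match l with
    | [] => simp [triCnt]
    | [x] => simp [triCnt]
    | x :: y :: t =>
      have hlen : (a :: x :: y :: t).length - 2 = ((x :: y :: t).length - 2) + 1 := by
        simp only [List.length_cons]; omega
      rw [hlen, List.range_succ_eq_map, List.foldl_cons, List.foldl_map]
      have hshift : (fun (st : Int × Int) (i : Nat) =>
          if (a :: x :: y :: t).getD (Nat.succ i) ' ' = (a :: x :: y :: t).getD (Nat.succ i + 1) ' ' ∧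
             (a :: x :: y :: t).getD (Nat.succ i + 1) ' ' = (a :: x :: y :: t).getD (Nat.succ i + 2) ' ' then
            if (a :: x :: y :: t).getD (Nat.succ i) ' ' = 'w' then (st.1 + 1, st.2)
            else if (a :: x :: y :: t).getD (Nat.succ i) ' ' = 'b' then (st.1, st.2 + 1)
            else st
          else st) = (fun (st : Int × Int) (i : Nat) =>
          if (x :: y :: t).getD i ' ' = (x :: y :: t).getD (i + 1) ' ' ∧
             (x :: y :: t).getD (i + 1) ' ' = (x :: y :: t).getD (i + 2) ' ' then
            if (x :: y :: t).getD i ' ' = 'w' then (st.1 + 1, st.2)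
            else if (x :: y :: t).getD i ' ' = 'b' then (st.1, st.2 + 1)
            else st
          else st) := by
        funext st i
        have e1 : Nat.succ i = i + 1 := rfl
        have e2 : i + 1 + 1 = (i + 1) + 1 := rfl
        have e3 : i + 1 + 2 = (i + 2) + 1 := by omega
        rw [e1, e3]
        simp [List.getD_cons_succ]
      rw [hshift]
      have h0 : (a :: x :: y :: t).getD 0 ' ' = a := rfl
      have h1 : (a :: x :: y :: t).getD 1 ' ' = x := rfl
      have h2 : (a :: x :: y :: t).getD 2 ' ' = y := rfl
      simp only [h0, h1, h2, Nat.zero_add]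
      have htri : ∀ ch, triCnt ch (a :: x :: y :: t) =
          (if a = x ∧ x = y ∧ a = ch then 1 else 0) + triCnt ch (x :: y :: t) := by
        intro ch; rfl
      split_ifs with hc hw hb
      · rw [ih, htri, htri]
        rw [if_pos ⟨hc.1, hc.2, hw⟩,
            if_neg (by rintro ⟨-, -, hB⟩; rw [hw] at hB; exact absurd hB (by decide))]
        simp only [Prod.mk.injEq]; constructor <;> ring
      · rw [ih, htri, htri]
        rw [if_neg (by rintro ⟨-, -, hW⟩; exact hw hW), if_pos ⟨hc.1, hc.2, hb⟩]
        simp only [Prod.mk.injEq]; constructor <;> ring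
      · rw [ih, htri, htri]
        rw [if_neg (fun h => hw h.2.2), if_neg (fun h => hb h.2.2)]
        simp
      · rw [ih, htri, htri]
        rw [if_neg (fun h => hc ⟨h.1, h.2.1⟩), if_neg (fun h => hc ⟨h.1, h.2.1⟩)]
        simp

lemma A_eval (val : String) :
    gamerColors val = if triCnt 'w' val.toList > triCnt 'b' val.toList then "wendy" else "bob" := by
  simp only [gamerColors, PySem.Str.len_eq]
  by_cases h : 2 ≤ val.toList.length
  · have hcast : (val.toList.length : Int) - 2 = ((val.toList.length - 2 : Nat) : Int) := by
      push_cast [h]; ring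
    simp only [hcast, PySem.List.pyRange_zero_natCast, List.foldl_map]
    have hfun : (fun (st : Int × Int) (k : Nat) =>
        if PySem.List.pyGetD val.toList (↑k) ' ' = PySem.List.pyGetD val.toList (↑k + 1) ' ' ∧
           PySem.List.pyGetD val.toList (↑k + 1) ' ' = PySem.List.pyGetD val.toList (↑k + 2) ' ' then
          if PySem.List.pyGetD val.toList (↑k) ' ' = 'w' then (st.1 + 1, st.2)
          else if PySem.List.pyGetD val.toList (↑k) ' ' = 'b' then (st.1, st.2 + 1)
          else st
        else st) = (fun (st : Int × Int) (k : Nat) =>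
        if val.toList.getD k ' ' = val.toList.getD (k + 1) ' ' ∧
           val.toList.getD (k + 1) ' ' = val.toList.getD (k + 2) ' ' then
          if val.toList.getD k ' ' = 'w' then (st.1 + 1, st.2)
          else if val.toList.getD k ' ' = 'b' then (st.1, st.2 + 1)
          else st
        else st) := by
      funext st k
      have e1 : (k : Int) + 1 = ((k + 1 : Nat) : Int) := by push_cast; ring
      have e2 : (k : Int) + 2 = ((k + 2 : Nat) : Int) := by push_cast; ring
      rw [e1, e2]
      simp only [PySem.List.pyGetD_natCast]
    rw [hfun, foldA]
    simp
  · have hz : (val.toList.length : Int) - 2 ≤ 0 := by omega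
    simp only [PySem.List.pyRange_one_eq_nil hz]
    have h0 : ∀ ch, triCnt ch val.toList = 0 := by
      have hlt : val.toList.length < 2 := by omega
      generalize val.toList = cs at hlt
      rcases cs with _ | ⟨a, _ | ⟨b, l⟩⟩
      · exact fun ch => rfl
      · exact fun ch => rfl
      · simp only [List.length_cons] at hlt; omega
    simp [List.foldl_nil, h0]

-- ===== VERDICT (by name: the statement is the Claim_ definition above) =====
theorem gamerColors_spec : Claim_equal_gamerColors := by
  intro val _
  show gamerColors val = gamerColors_alt val
  rw [A_eval]
  simp only [gamerColors_alt, altLoop_eq]
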